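-- pv_equiv track=rewrite | github.com/leey00nsu/Algorithm | 백준/Silver/1541. 잃어버린 괄호/잃어버린 괄호.py | calc
-- ===== SOURCE A (Python) =====
-- def calc(arr):
--   result=0
--   op=1
--   isNegative=False
--   for i in arr:
--     if(i=='+'):
--       if(isNegative):
--         op=-1
--       else:
--         op=1
--     elif(i=='-'):
--       op=-1
--       isNegative=True
--     else:
--       result+=int(i)*op
--
--
--   return result
-- ===== SOURCE B (Python) =====
-- def calc(arr):
--     try:
--         cut = arr.index('-')
--     except ValueError:
--         cut = len(arr)
--     add = sum(int(x) for x in arr[:cut] if x != '+')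
--     sub = sum(int(x) for x in arr[cut:] if x not in ('+', '-'))
--     return add - sub
-- ===== Notes on version B (the rewrite author's own statement) =====
-- stated objective: simpler
-- what changed: Replaces A's sign-flag fold (result/op/isNegative state machine) by locating the first '-' with arr.index, then summing the number tokens before it and subtracting the sum of the number tokens after it via two filtered comprehensions.
import Mathlib
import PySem

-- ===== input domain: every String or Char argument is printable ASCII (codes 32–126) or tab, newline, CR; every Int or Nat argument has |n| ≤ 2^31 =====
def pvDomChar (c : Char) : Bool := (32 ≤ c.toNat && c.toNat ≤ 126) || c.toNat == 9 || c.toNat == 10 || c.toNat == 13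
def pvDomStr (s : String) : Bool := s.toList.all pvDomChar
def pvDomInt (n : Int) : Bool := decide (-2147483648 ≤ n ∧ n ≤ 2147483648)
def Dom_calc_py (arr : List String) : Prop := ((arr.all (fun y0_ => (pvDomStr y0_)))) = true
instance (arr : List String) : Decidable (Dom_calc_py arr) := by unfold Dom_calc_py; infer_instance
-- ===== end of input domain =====

-- B replaces A's sign-flag fold by an index lookup for the first '-' plus two filtered
-- summations over the slices before/after it (objective: simpler decomposition, not faster).

-- ===== PORT A =====
-- state: (result, op, isNegative); int(i) ported as PySem.Int.ofStr? with default 0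
-- (Pre_ excludes the inputs where int(i) raises, so the default is never reached inside Pre_)
def calcStep (s : Int × Int × Bool) (i : String) : Int × Int × Bool :=
  if i = "+" then
    (s.1, if s.2.2 then -1 else 1, s.2.2)
  else if i = "-" then
    (s.1, -1, true)
  else
    (s.1 + (PySem.Int.ofStr? i).getD 0 * s.2.1, s.2.1, s.2.2)

def calc_py (arr : List String) : Int :=
  (arr.foldl calcStep (0, 1, false)).1

-- ===== PORT B =====
def calc_py_alt (arr : List String) : Int :=
  (((arr.take ((PySem.List.index? arr "-").getD arr.length)).filter (fun x => !(x = "+"))).map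
      (fun x => (PySem.Int.ofStr? x).getD 0)).sum
  - (((arr.drop ((PySem.List.index? arr "-").getD arr.length)).filter
        (fun x => !(x = "+") && !(x = "-"))).map
      (fun x => (PySem.Int.ofStr? x).getD 0)).sum

-- ===== PRECONDITION & SPEC =====
-- Pre_: every token is '+', '-', or a valid Python int literal — exactly where A's int(i) does not raise ValueError.
def Pre_calc_py (arr : List String) : Prop :=
  ∀ x ∈ arr, x = "+" ∨ x = "-" ∨ (PySem.Int.ofStr? x).isSome
instance (arr : List String) : Decidable (Pre_calc_py arr) := by unfold Pre_calc_py; infer_instance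

def pvWitness_calc_py : List String := ["55", "-", "50", "+", "40"]

def Spec_calc_py (arr : List String) (out : Int) : Prop := out = calc_py_alt arr
instance (arr : List String) (out : Int) : Decidable (Spec_calc_py arr out) := by unfold Spec_calc_py; infer_instance

-- ===== CLAIM (what is proved, stated in full; the proofs are below) =====
def Claim_equal_calc_py : Prop := ∀ (arr : List String), Dom_calc_py arr → Pre_calc_py arr → Spec_calc_py arr (calc_py arr)

-- ===== LEMMAS AND PROOFS =====

-- value of a number token (what both ports use for int(x))
def tokVal (x : String) : Int := (PySem.Int.ofStr? x).getD 0

-- sum of all number tokens of a list (the 'sub' sum of B)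
def sumSub (l : List String) : Int :=
  ((l.filter (fun x => !(x = "+") && !(x = "-"))).map tokVal).sum

-- once isNegative is set, A just subtracts every number token
lemma foldl_neg (l : List String) (r : Int) :
    (l.foldl calcStep (r, -1, true)).1 = r - sumSub l := by
  induction l generalizing r with
  | nil => simp [sumSub]
  | cons x t ih =>
    by_cases hp : x = "+"
    · subst hp; simp [calcStep, sumSub, ih]
    · by_cases hm : x = "-"
      · subst hm; simp [calcStep, sumSub, ih]
      · simp [calcStep, hp, hm, sumSub, ih, tokVal]
        ring

lemma alt_cons_plus (l : List String) : calc_py_alt ("+" :: l) = calc_py_alt l := by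
  unfold calc_py_alt
  rw [PySem.List.index?_cons_of_ne _ (by decide)]
  cases h : PySem.List.index? l "-" with
  | none => simp
  | some k =>
    have hk : k < l.length := (PySem.List.getElem_of_index?_eq_some h).1
    simp [List.take_succ_cons]

lemma alt_cons_minus (l : List String) : calc_py_alt ("-" :: l) = - sumSub l := by
  unfold calc_py_alt
  rw [PySem.List.index?_cons_self]
  simp [sumSub]
  rfl

lemma alt_cons_num (x : String) (l : List String) (hp : x ≠ "+") (hm : x ≠ "-") :
    calc_py_alt (x :: l) = tokVal x + calc_py_alt l := by
  unfold calc_py_alt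
  rw [PySem.List.index?_cons_of_ne _ hm]
  cases h : PySem.List.index? l "-" with
  | none => simp [hp, tokVal]
  | some k => simp [hp, List.take_succ_cons, tokVal]; ring

lemma foldl_pos (l : List String) (r : Int) :
    (l.foldl calcStep (r, 1, false)).1 = r + calc_py_alt l := by
  induction l generalizing r with
  | nil => simp [calc_py_alt]
  | cons x t ih =>
    by_cases hp : x = "+"
    · subst hp
      simp only [List.foldl_cons, calcStep]
      simpa [alt_cons_plus] using ih r
    · by_cases hm : x = "-"
      · subst hm
        simp only [List.foldl_cons, calcStep]
        simp [foldl_neg, alt_cons_minus]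
        ring
      · simp only [List.foldl_cons, calcStep, if_neg hp, if_neg hm]
        rw [alt_cons_num x t hp hm]
        have := ih (r + (PySem.Int.ofStr? x).getD 0 * 1)
        simp [tokVal] at this ⊢
        rw [this]; ring

-- ===== VERDICT (by name: the statement is the Claim_ definition above) =====
theorem calc_py_spec : Claim_equal_calc_py := by
  intro arr _ _
  show calc_py arr = calc_py_alt arr
  unfold calc_py
  simpa using foldl_pos arr 0
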